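-- pv_equiv track=rewrite | github.com/AsherZLong/PuzzleSolver | SudokuSolve.py | Box_maker
-- ===== SOURCE A (Python) =====
-- def Box_maker(x):
--     grid_size= len(x)
--     size_box = int(grid_size**0.5)
--     boxes = []
--     for box_i in range(0, size_box):
--         for box_j in range(0, size_box):
--             box = []
--             for i in range(0, size_box):
--                 for j in range(0, size_box):
--                     box.append(x[size_box*box_i + i][size_box*box_j + j]) # Covers every cell in the array and appends it to the current box which then is appended to the bigger array, boxes
--             boxes.append(box)
--     return boxes
-- ===== SOURCE B (Python) =====
-- def Box_maker(x):
--     grid_size = len(x)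
--     size_box = int(grid_size ** 0.5)
--     n = size_box * size_box
--     boxes = [[] for _ in range(n)]
--     for r in range(n):
--         row = x[r]
--         for c in range(n):
--             boxes[(r // size_box) * size_box + (c // size_box)].append(row[c])
--     return boxes
-- ===== Notes on version B (the rewrite author's own statement) =====
-- stated objective: alternative
-- what changed: Replaces the four nested box-gathering loops with a pre-allocated indexed list of empty boxes filled by a single flat row-major scatter pass computing each cell's box index (r//sb)*sb + c//sb.
import Mathlib
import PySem

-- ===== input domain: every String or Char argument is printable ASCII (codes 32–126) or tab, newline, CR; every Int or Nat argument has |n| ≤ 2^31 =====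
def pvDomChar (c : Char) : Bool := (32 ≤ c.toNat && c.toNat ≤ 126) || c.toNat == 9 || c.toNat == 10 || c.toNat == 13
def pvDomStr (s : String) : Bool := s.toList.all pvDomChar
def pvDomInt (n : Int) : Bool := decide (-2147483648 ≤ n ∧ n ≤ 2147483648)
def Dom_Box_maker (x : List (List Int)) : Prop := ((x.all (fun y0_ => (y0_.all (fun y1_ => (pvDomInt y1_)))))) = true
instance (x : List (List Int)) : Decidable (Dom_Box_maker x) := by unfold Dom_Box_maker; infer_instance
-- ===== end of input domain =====

-- B replaces A's four nested box-gathering loops by a pre-allocated indexed list of boxes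
-- filled in one flat row-major scatter pass (box index (r//sb)*sb + c//sb); same cost, different structure.


-- kernel-reducible floor square root (= Nat.sqrt = Python int(n**0.5) on these lengths):
-- the number of k ≤ n with k*k ≤ n, minus one
def pvIsqrt (n : Nat) : Nat := ((List.range (n + 1)).filter (fun k => decide (k * k ≤ n))).length - 1

-- ===== PORT A =====
-- int(grid_size**0.5) is pvIsqrt of the list length (exact for the lengths a list can have here);
-- x[...] is PySem.List.pyGetD, total stand-in for Python indexing, exact under Pre_ (indices are ≥ 0).
def Box_maker (x : List (List Int)) : List (List Int) :=
  let size_box : Int := ((pvIsqrt x.length : Nat) : Int)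
  (PySem.List.pyRange 0 size_box 1).foldl (fun boxes box_i =>
    (PySem.List.pyRange 0 size_box 1).foldl (fun boxes box_j =>
      let box := (PySem.List.pyRange 0 size_box 1).foldl (fun box i =>
        (PySem.List.pyRange 0 size_box 1).foldl (fun box j =>
          box ++ [PySem.List.pyGetD (PySem.List.pyGetD x (size_box * box_i + i) []) (size_box * box_j + j) 0]) box) []
      boxes ++ [box]) boxes) []

-- ===== PORT B =====
-- literal port of Source B: boxes = [[] for _ in range(n)], then one row-major pass appending each
-- cell to boxes[(r//sb)*sb + c//sb]; the index is ≥ 0 whenever the loops run, so .toNat is exact.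
def Box_maker_alt (x : List (List Int)) : List (List Int) :=
  let size_box : Int := ((pvIsqrt x.length : Nat) : Int)
  let n : Int := size_box * size_box
  let boxes0 : List (List Int) := (PySem.List.pyRange 0 n 1).map (fun _ => [])
  (PySem.List.pyRange 0 n 1).foldl (fun boxes r =>
    let row := PySem.List.pyGetD x r []
    (PySem.List.pyRange 0 n 1).foldl (fun boxes c =>
      boxes.modify ((PySem.Int.floordiv r size_box * size_box + PySem.Int.floordiv c size_box).toNat)
        (fun box => box ++ [PySem.List.pyGetD row c 0])) boxes) boxes0

-- ===== PRECONDITION & SPEC =====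
-- Pre_ excludes exactly the inputs where Python A raises IndexError: a row among the first
-- size_box² rows shorter than size_box² columns (B raises there too).
def Pre_Box_maker (x : List (List Int)) : Prop :=
  ∀ row ∈ x.take (pvIsqrt x.length * pvIsqrt x.length),
    pvIsqrt x.length * pvIsqrt x.length ≤ row.length
instance (x : List (List Int)) : Decidable (Pre_Box_maker x) := by unfold Pre_Box_maker; infer_instance
def pvWitness_Box_maker : List (List Int) :=
  [[1, 2, 3, 4], [5, 6, 7, 8], [9, 1, 2, 3], [4, 5, 6, 7]]

def Spec_Box_maker (x : List (List Int)) (out : List (List Int)) : Prop := out = Box_maker_alt x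
instance (x : List (List Int)) (out : List (List Int)) : Decidable (Spec_Box_maker x out) := by unfold Spec_Box_maker; infer_instance

-- ===== CLAIM (what is proved, stated in full; the proofs are below) =====
def Claim_equal_Box_maker : Prop := ∀ (x : List (List Int)), Dom_Box_maker x → Pre_Box_maker x → Spec_Box_maker x (Box_maker x)

-- ===== LEMMAS AND PROOFS =====

-- the totalized cell access both ports use, in Nat form
def pvG (x : List (List Int)) (r c : Nat) : Int := (x.getD r []).getD c 0

-- the box with coordinates (bi, bj), cells in row-major order
def pvBox (x : List (List Int)) (bi bj : Nat) : List Int :=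
  let s := pvIsqrt x.length
  (List.range s).flatMap (fun i => (List.range s).map (fun j => pvG x (s * bi + i) (s * bj + j)))

lemma A_natform (x : List (List Int)) :
    Box_maker x =
      (List.range (pvIsqrt x.length)).flatMap (fun bi =>
        (List.range (pvIsqrt x.length)).map (fun bj => pvBox x bi bj)) := by
  unfold Box_maker
  simp only [PySem.List.pyRange_zero_nat, List.foldl_map, ← Nat.cast_mul, ← Nat.cast_add,
    PySem.List.pyGetD_natCast, PySem.List.foldl_append_singleton_eq_map,
    PySem.List.foldl_append_eq_flatMap, List.nil_append, pvBox, pvG]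

lemma B_natform (x : List (List Int)) :
    Box_maker_alt x =
      (List.range (pvIsqrt x.length * pvIsqrt x.length)).foldl (fun boxes r =>
        (List.range (pvIsqrt x.length * pvIsqrt x.length)).foldl (fun boxes c =>
          boxes.modify (r / pvIsqrt x.length * pvIsqrt x.length + c / pvIsqrt x.length)
            (fun box => box ++ [pvG x r c])) boxes)
        ((List.range (pvIsqrt x.length * pvIsqrt x.length)).map (fun _ => [])) := by
  unfold Box_maker_alt
  simp only [← Nat.cast_mul, PySem.List.pyRange_zero_nat, List.foldl_map, List.map_map,
    PySem.Int.floordiv_natCast, ← Nat.cast_add, Int.toNat_natCast,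
    PySem.List.pyGetD_natCast, Function.comp_def, pvG]

lemma scatter_length {β γ : Type} (l : List β) (idx : β → Nat) (v : β → γ) (bx : List (List γ)) :
    (l.foldl (fun bx y => bx.modify (idx y) (fun t => t ++ [v y])) bx).length = bx.length := by
  induction l generalizing bx with
  | nil => rfl
  | cons y t ih => simpa [List.length_modify] using ih (bx.modify (idx y) (fun t => t ++ [v y]))

lemma scatter_getD {β γ : Type} (l : List β) (idx : β → Nat) (v : β → γ) (bx : List (List γ))
    (b : Nat) (hb : b < bx.length) :
    (l.foldl (fun bx y => bx.modify (idx y) (fun t => t ++ [v y])) bx).getD b []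
      = bx.getD b [] ++ (l.filter (fun y => decide (idx y = b))).map v := by
  induction l generalizing bx with
  | nil => simp
  | cons y t ih =>
    rw [List.foldl_cons, ih _ (by simpa [List.length_modify] using hb)]
    have hb' : b < (bx.modify (idx y) (fun t => t ++ [v y])).length := by
      simpa [List.length_modify] using hb
    rw [List.getD_eq_getElem _ _ hb', List.getElem_modify, List.getD_eq_getElem _ _ hb]
    by_cases h : idx y = b <;> simp [h]

lemma rows_length (g : Nat → Nat → Int) (idx : Nat → Nat → Nat) (rs cs : List Nat)
    (bx : List (List Int)) :
    (rs.foldl (fun bx r => cs.foldl (fun bx c => bx.modify (idx r c) (fun t => t ++ [g r c])) bx) bx).length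
      = bx.length := by
  induction rs generalizing bx with
  | nil => rfl
  | cons r t ih =>
    rw [List.foldl_cons, ih]
    exact scatter_length cs (idx r) (g r) bx

lemma rows_getD (g : Nat → Nat → Int) (idx : Nat → Nat → Nat) (rs cs : List Nat)
    (bx : List (List Int)) (b : Nat) (hb : b < bx.length) :
    (rs.foldl (fun bx r => cs.foldl (fun bx c => bx.modify (idx r c) (fun t => t ++ [g r c])) bx) bx).getD b []
      = bx.getD b [] ++ rs.flatMap (fun r => (cs.filter (fun c => decide (idx r c = b))).map (g r)) := by
  induction rs generalizing bx with
  | nil => simp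
  | cons r t ih =>
    rw [List.foldl_cons, ih _ (by rw [scatter_length]; exact hb),
        scatter_getD cs (idx r) (g r) bx b hb]
    simp




lemma range_mul_chunk (s k : Nat) :
    List.range (s * k) = (List.range k).flatMap (fun q => (List.range s).map (fun r => s * q + r)) := by
  induction k with
  | zero => simp
  | succ k ih =>
    rw [Nat.mul_succ, List.range_add, List.range_succ, List.flatMap_append, ← ih]
    simp

lemma flatMap_ite_eq {α : Type} (m bi : Nat) (H : Nat → List α) (h : bi < m) :
    (List.range m).flatMap (fun q => if q = bi then H q else []) = H bi := by
  induction m with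
  | zero => omega
  | succ m ih =>
    rw [List.range_succ, List.flatMap_append]
    by_cases hbi : bi = m
    · subst hbi
      have h0 : (List.range bi).flatMap (fun q => if q = bi then H q else []) = [] := by
        rw [List.flatMap_eq_nil_iff]
        intro q hq
        have : q < bi := List.mem_range.mp hq
        simp [Nat.ne_of_lt this]
      simp [h0]
    · have : bi < m := by omega
      rw [ih this]
      simp [Ne.symm hbi]

lemma box_index_eq (s bi' q b : Nat) (hq : q < s) :
    (bi' * s + q = b) ↔ (bi' = b / s ∧ q = b % s) := by
  constructor
  · rintro rfl
    have hs : 0 < s := by omega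
    rw [Nat.mul_comm bi' s, Nat.mul_add_div hs, Nat.mul_add_mod, Nat.div_eq_of_lt hq,
      Nat.mod_eq_of_lt hq]
    simp
  · rintro ⟨rfl, rfl⟩
    rw [Nat.mul_comm]
    exact Nat.div_add_mod b s

lemma cols_filter (s b : Nat) (hs : 0 < s) (bi' : Nat) :
    (List.range (s * s)).filter (fun c => decide (bi' * s + c / s = b))
      = (List.range s).flatMap (fun q =>
          if bi' * s + q = b then (List.range s).map (fun j => s * q + j) else []) := by
  rw [range_mul_chunk s s, List.filter_flatMap]
  apply List.flatMap_congr
  intro q hq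
  rw [List.filter_map]
  rw [List.filter_congr (q := fun _ => decide (bi' * s + q = b))
    (by intro j hj
        have hj' : j < s := List.mem_range.mp hj
        simp [Function.comp, Nat.mul_add_div hs, Nat.div_eq_of_lt hj'])]
  by_cases hcond : bi' * s + q = b <;> simp [hcond]

lemma E_eval (s b : Nat) (g : Nat → Nat → Int) (hb : b < s * s) :
    (List.range (s * s)).flatMap (fun r =>
        ((List.range (s * s)).filter (fun c => decide (r / s * s + c / s = b))).map (g r))
      = (List.range s).flatMap (fun i =>
          (List.range s).map (fun j => g (s * (b / s) + i) (s * (b % s) + j))) := by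
  have hs : 0 < s := by
    rcases Nat.eq_zero_or_pos s with rfl | h
    · simp at hb
    · exact h
  have hbi : b / s < s := (Nat.div_lt_iff_lt_mul hs).mpr hb
  have hbj : b % s < s := Nat.mod_lt _ hs
  simp only [cols_filter s b hs]
  rw [range_mul_chunk s s]
  simp only [List.flatMap_assoc, List.flatMap_map]
  have key : ∀ bi', bi' < s →
      (List.range s).flatMap (fun i =>
        List.map (g (s * bi' + i))
          (List.flatMap (fun q =>
              if (s * bi' + i) / s * s + q = b then List.map (fun j => s * q + j) (List.range s) else [])
            (List.range s)))
      = if bi' = b / s then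
          (List.range s).flatMap (fun i =>
            List.map (fun j => g (s * (b / s) + i) (s * (b % s) + j)) (List.range s))
        else [] := by
    intro bi' hbi'
    by_cases hcase : bi' = b / s
    · rw [if_pos hcase]
      apply List.flatMap_congr
      intro i hi
      have hi' : i < s := List.mem_range.mp hi
      have hdiv : (s * bi' + i) / s = bi' := by
        rw [Nat.mul_add_div hs]; simp [Nat.div_eq_of_lt hi']
      rw [List.flatMap_congr (g := fun q => if q = b % s then List.map (fun j => s * q + j) (List.range s) else [])
        (by intro q hq
            have hq' : q < s := List.mem_range.mp hq
            rw [hdiv, hcase]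
            simp [box_index_eq s (b / s) q b hq'])]
      rw [flatMap_ite_eq s (b % s) _ hbj, List.map_map]
      simp [Function.comp, hcase]
    · rw [if_neg hcase]
      rw [List.flatMap_eq_nil_iff]
      intro i hi
      have hi' : i < s := List.mem_range.mp hi
      have hdiv : (s * bi' + i) / s = bi' := by
        rw [Nat.mul_add_div hs]; simp [Nat.div_eq_of_lt hi']
      simp only [List.map_eq_nil_iff, List.flatMap_eq_nil_iff]
      intro q hq
      have hq' : q < s := List.mem_range.mp hq
      rw [hdiv]
      simp only [box_index_eq s bi' q b hq']
      simp [hcase]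
  rw [← flatMap_ite_eq s (b / s) (fun _ =>
      (List.range s).flatMap (fun i =>
        List.map (fun j => g (s * (b / s) + i) (s * (b % s) + j)) (List.range s))) hbi]
  exact List.flatMap_congr (fun bi' h => key bi' (List.mem_range.mp h))

lemma B_getD (x : List (List Int)) (b : Nat) (hb : b < pvIsqrt x.length * pvIsqrt x.length) :
    (Box_maker_alt x).getD b [] = pvBox x (b / pvIsqrt x.length) (b % pvIsqrt x.length) := by
  rw [B_natform, rows_getD _ _ _ _ _ b (by simpa using hb)]
  have h0 : ((List.range (pvIsqrt x.length * pvIsqrt x.length)).map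
      (fun _ => ([] : List Int))).getD b [] = [] := by
    rcases Nat.lt_or_ge b (pvIsqrt x.length * pvIsqrt x.length) with h | h
    · rw [List.getD_eq_getElem _ _ (by simpa using h), List.getElem_map]
    · rw [List.getD_eq_getElem?_getD, List.getElem?_eq_none (by simpa using h)]
      rfl
  rw [h0, List.nil_append, E_eval _ _ _ hb]
  simp [pvBox]

lemma B_length (x : List (List Int)) :
    (Box_maker_alt x).length = pvIsqrt x.length * pvIsqrt x.length := by
  rw [B_natform, rows_length]
  simp

lemma A_mapform (x : List (List Int)) :
    Box_maker x = (List.range (pvIsqrt x.length * pvIsqrt x.length)).map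
      (fun b => pvBox x (b / pvIsqrt x.length) (b % pvIsqrt x.length)) := by
  rw [A_natform]
  conv_rhs => rw [range_mul_chunk (pvIsqrt x.length) (pvIsqrt x.length)]
  simp only [List.map_flatMap, List.map_map]
  apply List.flatMap_congr
  intro q hq
  apply List.map_congr_left
  intro r hr
  have hr' : r < pvIsqrt x.length := List.mem_range.mp hr
  have hs : 0 < pvIsqrt x.length := by omega
  have h1 : (pvIsqrt x.length * q + r) / pvIsqrt x.length = q := by
    rw [Nat.mul_add_div hs]; simp [Nat.div_eq_of_lt hr']
  have h2 : (pvIsqrt x.length * q + r) % pvIsqrt x.length = r := by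
    rw [Nat.mul_add_mod]; exact Nat.mod_eq_of_lt hr'
  simp [h1, h2]

-- ===== VERDICT (by name: the statement is the Claim_ definition above) =====
theorem Box_maker_spec : Claim_equal_Box_maker := by
  intro x _ _
  unfold Spec_Box_maker
  rw [A_mapform]
  apply List.ext_getElem
  · rw [B_length]; simp
  · intro b h1 h2
    have hb : b < pvIsqrt x.length * pvIsqrt x.length := by
      rw [B_length] at h2; exact h2
    rw [List.getElem_map, List.getElem_range, ← List.getD_eq_getElem _ [] h2, B_getD x b hb]
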